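-- pv_equiv track=rewrite | github.com/WCNegentropy/Procedural-Engine-v2 | Legacy/tests/test_cpp_seed_registry.py | _splitmix64_sequence
-- ===== SOURCE A (Python) =====
-- def _splitmix64_sequence(root: int, n: int) -> list[int]:
--     """Return the first ``n`` subseeds using the splitmix64 algorithm."""
--
--     state = root
--     mask = 0xFFFFFFFFFFFFFFFF
--     out = []
--     for _ in range(n):
--         state = (state + 0x9E3779B97F4A7C15) & mask
--         z = (state ^ (state >> 30)) * 0xBF58476D1CE4E5B9 & mask
--         z = (z ^ (z >> 27)) * 0x94D049BB133111EB & mask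
--         out.append(z ^ (z >> 31))
--     return out
-- ===== SOURCE B (Python) =====
-- _MASK = 0xFFFFFFFFFFFFFFFF
-- _GAMMA = 0x9E3779B97F4A7C15
--
--
-- def _mix(s: int) -> int:
--     z = (s ^ (s >> 30)) * 0xBF58476D1CE4E5B9 & _MASK
--     z = (z ^ (z >> 27)) * 0x94D049BB133111EB & _MASK
--     return z ^ (z >> 31)
--
--
-- def _splitmix64_sequence(root: int, n: int) -> list[int]:
--     """Return the first ``n`` subseeds using the splitmix64 algorithm."""
--     return [_mix((root + (i + 1) * _GAMMA) & _MASK) for i in range(n)]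
-- ===== Notes on version B (the rewrite author's own statement) =====
-- stated objective: alternative
-- what changed: Replaced the loop that threads the splitmix64 state through an accumulator with a stateless per-index closed form: a pure mix(s) helper applied to (root + (i+1)*GAMMA) & mask in a comprehension.
import Mathlib
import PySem

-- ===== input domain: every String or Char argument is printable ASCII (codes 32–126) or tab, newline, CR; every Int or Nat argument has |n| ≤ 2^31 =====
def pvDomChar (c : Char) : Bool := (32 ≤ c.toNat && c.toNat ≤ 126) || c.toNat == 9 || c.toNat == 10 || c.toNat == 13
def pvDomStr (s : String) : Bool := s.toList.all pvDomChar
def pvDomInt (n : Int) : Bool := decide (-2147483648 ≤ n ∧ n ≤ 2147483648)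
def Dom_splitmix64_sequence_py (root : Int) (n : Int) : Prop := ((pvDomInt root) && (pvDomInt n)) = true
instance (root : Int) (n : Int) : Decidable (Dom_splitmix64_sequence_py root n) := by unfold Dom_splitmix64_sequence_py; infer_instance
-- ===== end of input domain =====

-- B replaces A's threaded splitmix64 state with a stateless per-index closed form:
-- subseed i = mix((root + (i+1)*GAMMA) mod 2^64); same values, an 'alternative' decomposition.
-- Python's 'x & 0xFFFFFFFFFFFFFFFF' is exactly reduction mod 2^64 (Int.emod, exact for all ints);
-- Python's 'x >> k' is floor division by 2^k (Int.fdiv, exact for all ints); '^' on the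
-- nonnegative values produced after masking is Int xor (^^^), exact there.

def pvM : Int := 0x10000000000000000
def pvGamma : Int := 0x9E3779B97F4A7C15

-- ===== PORT A =====
-- A's for-loop over range(n), threading (state, out).
def pvALoop (k : Nat) (state : Int) (out : List Int) : List Int :=
  match k with
  | 0 => out
  | Nat.succ k =>
    let s := (state + pvGamma).emod pvM                                   -- state = (state + GAMMA) & mask
    let z1 := ((Int.xor s (Int.fdiv s (2 ^ 30))) * 0xBF58476D1CE4E5B9).emod pvM -- z = (state ^ (state >> 30)) * C1 & mask
    let z2 := ((Int.xor z1 (Int.fdiv z1 (2 ^ 27))) * 0x94D049BB133111EB).emod pvM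
    pvALoop k s (out ++ [Int.xor z2 (Int.fdiv z2 (2 ^ 31))])                    -- out.append(z ^ (z >> 31))

def splitmix64_sequence_py (root : Int) (n : Int) : List Int :=
  pvALoop n.toNat root []

-- ===== PORT B =====
-- B's pure mixing helper _mix.
def pvMix (s : Int) : Int :=
  let z1 := ((Int.xor s (Int.fdiv s (2 ^ 30))) * 0xBF58476D1CE4E5B9).emod pvM
  let z2 := ((Int.xor z1 (Int.fdiv z1 (2 ^ 27))) * 0x94D049BB133111EB).emod pvM
  Int.xor z2 (Int.fdiv z2 (2 ^ 31))

def splitmix64_sequence_py_alt (root : Int) (n : Int) : List Int :=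
  (PySem.List.pyRange 0 n 1).map (fun i => pvMix ((root + (i + 1) * pvGamma).emod pvM))

-- ===== PRECONDITION & SPEC =====
def Spec_splitmix64_sequence_py (root : Int) (n : Int) (out : List Int) : Prop := out = splitmix64_sequence_py_alt root n
instance (root : Int) (n : Int) (out : List Int) : Decidable (Spec_splitmix64_sequence_py root n out) := by unfold Spec_splitmix64_sequence_py; infer_instance

-- ===== CLAIM (what is proved, stated in full; the proofs are below) =====
def Claim_equal_splitmix64_sequence_py : Prop := ∀ (root : Int) (n : Int), Dom_splitmix64_sequence_py root n → Spec_splitmix64_sequence_py root n (splitmix64_sequence_py root n)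

-- ===== LEMMAS AND PROOFS =====

-- loop invariant: A's threaded state at step j equals B's closed form (state + (j+1)*GAMMA) mod 2^64
theorem pvALoop_invariant (k : Nat) (state : Int) (out : List Int) :
    pvALoop k state out =
      out ++ (List.range k).map (fun (j : Nat) => pvMix ((state + ((j : Int) + 1) * pvGamma).emod pvM)) := by
  induction k generalizing state out with
  | zero => simp [pvALoop]
  | succ k ih =>
    show pvALoop k ((state + pvGamma).emod pvM)
        (out ++ [pvMix ((state + pvGamma).emod pvM)]) = _
    rw [ih, List.range_succ_eq_map, List.map_cons, List.map_map, List.append_assoc,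
      List.singleton_append]
    congr 1
    congr 1
    refine List.map_congr_left fun j _ => ?_
    simp only [Function.comp_apply]
    congr 1
    push_cast
    conv_rhs => rw [show state + ((j : Int) + 1 + 1) * pvGamma
        = (state + pvGamma) + ((j : Int) + 1) * pvGamma by ring]
    exact Int.emod_add_emod _ _ _

theorem splitmix64_sequence_py_eq_alt (root n : Int) :
    splitmix64_sequence_py root n = splitmix64_sequence_py_alt root n := by
  rw [splitmix64_sequence_py, splitmix64_sequence_py_alt, pvALoop_invariant,
    PySem.List.pyRange_one]
  simp only [List.map_map, List.nil_append, Int.sub_zero]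
  refine List.map_congr_left fun j _ => ?_
  simp

-- ===== VERDICT (by name: the statement is the Claim_ definition above) =====
theorem splitmix64_sequence_py_spec : Claim_equal_splitmix64_sequence_py := by
  intro root n _
  unfold Spec_splitmix64_sequence_py
  exact splitmix64_sequence_py_eq_alt root n
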